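-- pv_equiv track=rewrite | github.com/quoctruong247/hoc_ky_he | python/bt_ki_nang.py | tongCTieu
-- ===== SOURCE A (Python) =====
-- def tongCTieu(num):
--     numl = numtemp = tong10 = 0
--     while num:
--         numl = int(num % 10)
--         num = int(num / 10)
--         numtemp = int(num % 10)
--         num = int(num / 10)
--         if int(num % 10) > numtemp < numl:
--             tong10 += numtemp
--     return tong10
-- ===== SOURCE B (Python) =====
-- def tongCTieu(num):
--     # Phase 1: extract all decimal digits, least-significant first
--     # (same int(num/10) truncating extraction as the original).
--     ds = []
--     while num:
--         ds.append(int(num % 10))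
--         num = int(num / 10)
--     # Phase 2: one indexed pass over the digit pairs.
--     tong10 = 0
--     for j in range(len(ds) // 2):
--         lo = ds[2 * j]
--         mid = ds[2 * j + 1]
--         hi = ds[2 * j + 2] if 2 * j + 2 < len(ds) else 0
--         if hi > mid and mid < lo:
--             tong10 += mid
--     return tong10
-- ===== Notes on version B (the rewrite author's own statement) =====
-- stated objective: alternative
-- what changed: A's single interleaved while-loop that peels two digits per iteration and tests against a lookahead digit is replaced by two phases: extract all decimal digits into a list (same truncating int(num/10) extraction), then one indexed for-loop over the digit pairs reading neighbours by index.
import Mathlib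
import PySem

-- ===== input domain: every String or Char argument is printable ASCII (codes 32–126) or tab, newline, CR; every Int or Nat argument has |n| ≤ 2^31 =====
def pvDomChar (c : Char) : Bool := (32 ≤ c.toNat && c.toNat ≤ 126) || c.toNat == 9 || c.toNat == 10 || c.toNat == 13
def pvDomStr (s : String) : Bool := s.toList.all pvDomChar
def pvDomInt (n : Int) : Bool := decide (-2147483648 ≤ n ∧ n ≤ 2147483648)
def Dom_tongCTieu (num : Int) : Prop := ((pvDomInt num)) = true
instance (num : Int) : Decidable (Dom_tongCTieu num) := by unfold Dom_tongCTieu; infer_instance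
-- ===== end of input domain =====

-- B replaces A's interleaved peel-and-test while-loop by extract-all-digits then one indexed pass (alternative decomposition, same cost).


-- termination helpers for both ports (cited in decreasing_by)
theorem pvTruncdiv10_natAbs_le (n : Int) : (PySem.Int.truncdiv n 10).natAbs ≤ n.natAbs := by
  simp only [PySem.Int.truncdiv, Int.natAbs_tdiv]
  exact Nat.div_le_self _ _

theorem pvTruncdiv10_natAbs_lt (n : Int) (h : n ≠ 0) :
    (PySem.Int.truncdiv n 10).natAbs < n.natAbs := by
  simp only [PySem.Int.truncdiv, Int.natAbs_tdiv]
  exact Nat.div_lt_self (by omega) (by norm_num)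

-- ===== PORT A =====
-- the while-loop of A; numl/numtemp are re-assigned before every use, so the loop state is (num, tong10).
-- int(num / 10) is exact truncating division for |num| ≤ 2^31 ⊂ |·| < 2^53: PySem.Int.truncdiv
def tongCTieuLoop (num tong10 : Int) : Int :=
  if num = 0 then tong10
  else
    let numl := PySem.Int.mod num 10
    let num1 := PySem.Int.truncdiv num 10
    let numtemp := PySem.Int.mod num1 10
    let num2 := PySem.Int.truncdiv num1 10
    tongCTieuLoop num2
      (if PySem.Int.mod num2 10 > numtemp ∧ numtemp < numl then tong10 + numtemp else tong10)
termination_by num.natAbs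
decreasing_by
  exact Nat.lt_of_le_of_lt (pvTruncdiv10_natAbs_le _) (pvTruncdiv10_natAbs_lt num (by assumption))

def tongCTieu (num : Int) : Int := tongCTieuLoop num 0

-- ===== PORT B =====
-- phase 1 of B: ds.append(int(num % 10)); num = int(num / 10)
def tongCTieuDigits (num : Int) (ds : List Int) : List Int :=
  if num = 0 then ds
  else tongCTieuDigits (PySem.Int.truncdiv num 10) (ds ++ [PySem.Int.mod num 10])
termination_by num.natAbs
decreasing_by exact pvTruncdiv10_natAbs_lt num (by assumption)

-- phase 2 of B: for j in range(len(ds) // 2): …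
def tongCTieu_alt (num : Int) : Int :=
  let ds := tongCTieuDigits num []
  (PySem.List.pyRange 0 (PySem.Int.floordiv (ds.length : Int) 2) 1).foldl
    (fun tong10 j =>
      let lo := PySem.List.pyGetD ds (2 * j) 0
      let mid := PySem.List.pyGetD ds (2 * j + 1) 0
      let hi := if 2 * j + 2 < (ds.length : Int) then PySem.List.pyGetD ds (2 * j + 2) 0 else 0
      if hi > mid ∧ mid < lo then tong10 + mid else tong10) 0

-- ===== PRECONDITION & SPEC =====
def Spec_tongCTieu (num : Int) (out : Int) : Prop := out = tongCTieu_alt num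
instance (num : Int) (out : Int) : Decidable (Spec_tongCTieu num out) := by unfold Spec_tongCTieu; infer_instance

-- ===== CLAIM (what is proved, stated in full; the proofs are below) =====
def Claim_equal_tongCTieu : Prop := ∀ (num : Int), Dom_tongCTieu num → Spec_tongCTieu num (tongCTieu num)

-- ===== LEMMAS AND PROOFS =====

-- the digit list of num, cons form (proof-side characterisation of tongCTieuDigits)
def pvDigits (num : Int) : List Int :=
  if num = 0 then []
  else PySem.Int.mod num 10 :: pvDigits (PySem.Int.truncdiv num 10)
termination_by num.natAbs
decreasing_by exact pvTruncdiv10_natAbs_lt num (by assumption)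

theorem tongCTieuDigits_eq (num : Int) (ds : List Int) :
    tongCTieuDigits num ds = ds ++ pvDigits num := by
  induction num, ds using tongCTieuDigits.induct with
  | case1 ds => rw [tongCTieuDigits, pvDigits]; simp
  | case2 num ds h ih =>
    rw [tongCTieuDigits, pvDigits]
    simp [h, PySem.Int.mod] at ih ⊢
    simp [ih]

-- the common value: sum of every second digit mid for which (next digit or 0) > mid < previous digit
def pvOddSum : List Int → Int
  | [] => 0
  | [_] => 0
  | a :: b :: rest => (if rest.headD 0 > b ∧ b < a then b else 0) + pvOddSum rest

theorem pvDigits_headD (num : Int) : (pvDigits num).headD 0 = PySem.Int.mod num 10 := by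
  rw [pvDigits]
  by_cases h : num = 0 <;> simp [h, PySem.Int.mod]

theorem tongCTieuLoop_eq (num tong10 : Int) :
    tongCTieuLoop num tong10 = tong10 + pvOddSum (pvDigits num) := by
  induction num, tong10 using tongCTieuLoop.induct with
  | case1 t => rw [tongCTieuLoop, pvDigits]; simp [pvOddSum]
  | case2 num t h numl num1 numtemp num2 ih =>
    simp only [dite_eq_ite, numl, num1, numtemp, num2] at ih
    rw [tongCTieuLoop]
    simp only [h, if_neg, not_false_iff]
    rw [ih]
    conv_rhs => rw [pvDigits]
    simp only [h, if_neg, not_false_iff]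
    by_cases h1 : PySem.Int.truncdiv num 10 = 0
    · -- one digit left: numtemp = 0, the comparison 0 > 0 fails, the loop ends
      rw [h1]
      have z1 : PySem.Int.truncdiv 0 10 = 0 := by decide
      have z2 : PySem.Int.mod 0 10 = 0 := by decide
      rw [z1, z2]
      have z3 : pvDigits 0 = [] := by rw [pvDigits]; simp
      rw [z3]
      simp [pvOddSum]
    · conv_rhs => rw [pvDigits]
      simp only [h1, if_neg, not_false_iff]
      rw [show ∀ a b rest, pvOddSum (a :: b :: rest) = (if rest.headD 0 > b ∧ b < a then b else 0) + pvOddSum rest from fun _ _ _ => rfl]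
      rw [pvDigits_headD]
      split <;> ring

-- B's indexed pass, rephrased with Nat indices and List.range, computes pvOddSum
theorem pvFoldB_eq (ds : List Int) : ∀ t : Int,
    (List.range (ds.length / 2)).foldl
      (fun tong10 (k : Nat) =>
        if (if 2 * k + 2 < ds.length then ds.getD (2 * k + 2) 0 else 0) > ds.getD (2 * k + 1) 0
            ∧ ds.getD (2 * k + 1) 0 < ds.getD (2 * k) 0
        then tong10 + ds.getD (2 * k + 1) 0 else tong10) t
    = t + pvOddSum ds := by
  induction ds using pvOddSum.induct with
  | case1 => intro t; simp [pvOddSum]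
  | case2 a => intro t; simp [pvOddSum]
  | case3 a b rest ih =>
    intro t
    have hlen : (a :: b :: rest).length / 2 = rest.length / 2 + 1 := by
      simp [List.length_cons]; omega
    rw [hlen, List.range_succ_eq_map, List.foldl_cons, List.foldl_map]
    have hbody : (fun (tong10 : Int) (k : Nat) =>
        if (if 2 * (k+1) + 2 < (a :: b :: rest).length then (a :: b :: rest).getD (2 * (k+1) + 2) 0 else 0) > (a :: b :: rest).getD (2 * (k+1) + 1) 0
            ∧ (a :: b :: rest).getD (2 * (k+1) + 1) 0 < (a :: b :: rest).getD (2 * (k+1)) 0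
        then tong10 + (a :: b :: rest).getD (2 * (k+1) + 1) 0 else tong10)
        = (fun (tong10 : Int) (k : Nat) =>
        if (if 2 * k + 2 < rest.length then rest.getD (2 * k + 2) 0 else 0) > rest.getD (2 * k + 1) 0
            ∧ rest.getD (2 * k + 1) 0 < rest.getD (2 * k) 0
        then tong10 + rest.getD (2 * k + 1) 0 else tong10) := by
      funext tong10 k
      have e1 : 2 * (k+1) + 2 = (2 * k + 2) + 2 := by omega
      have e2 : 2 * (k+1) + 1 = (2 * k + 1) + 2 := by omega
      have e3 : 2 * (k+1) = 2 * k + 2 := by omega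
      rw [e1, e2, e3]
      have e5 : 2 * k + 3 ≤ rest.length ↔ 2 * k + 2 < rest.length := by omega
      simp [e5]
    rw [hbody, ih]
    have hstep : (if (if 2 * 0 + 2 < (a :: b :: rest).length then (a :: b :: rest).getD (2 * 0 + 2) 0 else 0) > (a :: b :: rest).getD (2 * 0 + 1) 0
            ∧ (a :: b :: rest).getD (2 * 0 + 1) 0 < (a :: b :: rest).getD (2 * 0) 0
        then t + (a :: b :: rest).getD (2 * 0 + 1) 0 else t)
        = t + (if rest.headD 0 > b ∧ b < a then b else 0) := by
      cases rest <;> simp <;> split <;> simp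
    rw [hstep, pvOddSum]
    ring

-- ===== VERDICT (by name: the statement is the Claim_ definition above) =====
theorem tongCTieu_spec : Claim_equal_tongCTieu := by
  intro num _
  unfold Spec_tongCTieu tongCTieu tongCTieu_alt
  rw [tongCTieuLoop_eq, tongCTieuDigits_eq]
  simp only [List.nil_append]
  set ds := pvDigits num with hds
  have hfd : PySem.Int.floordiv (ds.length : Int) 2 = ((ds.length / 2 : Nat) : Int) := by
    exact_mod_cast PySem.Int.floordiv_natCast ds.length 2
  rw [hfd, PySem.List.pyRange_one]
  have hlen : (((ds.length / 2 : Nat) : Int) - 0).toNat = ds.length / 2 := by omega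
  rw [hlen, List.foldl_map]
  have hbody : (fun (tong10 : Int) (k : Nat) =>
      let lo := PySem.List.pyGetD ds (2 * ((0 : Int) + (k : Int))) 0
      let mid := PySem.List.pyGetD ds (2 * ((0 : Int) + (k : Int)) + 1) 0
      let hi := if 2 * ((0 : Int) + (k : Int)) + 2 < (ds.length : Int) then PySem.List.pyGetD ds (2 * ((0 : Int) + (k : Int)) + 2) 0 else 0
      if hi > mid ∧ mid < lo then tong10 + mid else tong10)
      = (fun tong10 (k : Nat) =>
        if (if 2 * k + 2 < ds.length then ds.getD (2 * k + 2) 0 else 0) > ds.getD (2 * k + 1) 0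
            ∧ ds.getD (2 * k + 1) 0 < ds.getD (2 * k) 0
        then tong10 + ds.getD (2 * k + 1) 0 else tong10) := by
    funext tong10 k
    have e0 : (0 : Int) + (k : Int) = ((k : Nat) : Int) := by omega
    have e1 : 2 * ((k : Nat) : Int) = ((2 * k : Nat) : Int) := by push_cast; ring
    have e2 : ((2 * k : Nat) : Int) + 1 = ((2 * k + 1 : Nat) : Int) := by push_cast; ring
    have e3 : ((2 * k : Nat) : Int) + 2 = ((2 * k + 2 : Nat) : Int) := by push_cast; ring
    simp only [e0, e1, e2, e3, PySem.List.pyGetD_natCast, Nat.cast_lt]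
  rw [hbody, pvFoldB_eq]
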